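-- pv_equiv track=rewrite | github.com/ingyeom-park/Coding-Test | 프로그래머스/0/120853. 컨트롤 제트/컨트롤 제트.py | solution
-- ===== SOURCE A (Python) =====
-- def solution(s):
--     command = s.split(" ")
--
--     answer = []
--
--     for i in range(len(command)):
--
--         if command[i] != "Z":
--             answer.append(int(command[i]))
--         else: # command[i] == "Z"
--             answer.pop(-1)
--
--     real_answer = 0
--     for i in answer:
--         real_answer += i
--
--     return (real_answer)
-- ===== SOURCE B (Python) =====
-- def solution(s):
--     total = 0
--     skip = 0
--     for tok in reversed(s.split(" ")):
--         if tok == "Z":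
--             skip += 1
--         elif skip:
--             skip -= 1
--         else:
--             total += int(tok)
--     return total
-- ===== Notes on version B (the rewrite author's own statement) =====
-- stated objective: alternative
-- what changed: B replaces A's stack-then-sum with a right-to-left scan keeping only a pending-undo counter: each 'Z' increments it, a number is skipped while the counter is positive and added to the total otherwise, so no stack of values is ever built; Pre_ excludes the inputs where A raises (a stray 'Z' popping an empty list, or a token int() rejects).
import Mathlib
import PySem

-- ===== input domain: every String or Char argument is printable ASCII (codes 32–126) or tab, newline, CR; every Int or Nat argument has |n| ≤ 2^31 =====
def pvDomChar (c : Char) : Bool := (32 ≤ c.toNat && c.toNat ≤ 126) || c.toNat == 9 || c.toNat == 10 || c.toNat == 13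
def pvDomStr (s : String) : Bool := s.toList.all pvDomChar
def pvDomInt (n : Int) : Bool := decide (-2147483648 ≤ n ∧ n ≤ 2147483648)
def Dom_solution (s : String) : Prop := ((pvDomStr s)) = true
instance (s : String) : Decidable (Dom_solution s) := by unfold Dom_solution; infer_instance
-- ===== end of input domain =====

-- B replaces A's stack-then-sum with a right-to-left scan keeping only a pending-undo
-- counter; equivalence is proved on Pre_, which excludes exactly the inputs where A raises.

-- ===== PORT A =====
-- A's loop: push int(tok) for non-"Z", pop the last element for "Z"; none = the loop raises.
def solutionLoopA : List String → List Int → Option (List Int)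
  | [], st => some st
  | t :: rest, st =>
    if t ≠ "Z" then
      match PySem.Int.ofStr? t with
      | some n => solutionLoopA rest (st ++ [n])
      | none => none          -- int(tok) raises ValueError
    else
      match PySem.List.pop? st (-1) with
      | some (_, st') => solutionLoopA rest st'
      | none => none          -- pop(-1) on empty raises IndexError

def solution (s : String) : Int :=
  match solutionLoopA ((PySem.Str.split? s " ").getD []) [] with
  | some answer => answer.foldl (· + ·) 0   -- A's second loop: real_answer += i
  | none => 0                               -- unreachable under Pre_solution (A raised)

-- ===== PORT B =====
-- B's loop over the REVERSED token list, carrying the two variables (skip, total);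
-- none = int(tok) raises ValueError on a surviving token.
def solutionLoopB : List String → Nat → Int → Option (Nat × Int)
  | [], skip, total => some (skip, total)
  | t :: rest, skip, total =>
    if t = "Z" then solutionLoopB rest (skip + 1) total
    else if skip ≠ 0 then solutionLoopB rest (skip - 1) total
    else
      match PySem.Int.ofStr? t with
      | some n => solutionLoopB rest skip (total + n)
      | none => none

def solution_alt (s : String) : Int :=
  match solutionLoopB ((PySem.Str.split? s " ").getD []).reverse 0 0 with
  | some (_, total) => total
  | none => 0                               -- unreachable under Pre_solution

-- ===== PRECONDITION & SPEC =====
-- Named constants for Pre_'s text: the undo token (the letter Z).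
def pvZ : String := "Z"

-- Exactly the inputs where the Python A returns: every token other than "Z" parses as an
-- int, and before every "Z" token more int tokens than "Z" tokens occurred (so the stack
-- is nonempty at each pop).
def Pre_solution (s : String) : Prop :=
  ∀ i ∈ List.range ((PySem.Str.split? s " ").getD []).length,
    (((PySem.Str.split? s " ").getD []).getD i pvZ = pvZ →
      2 * ((((PySem.Str.split? s " ").getD []).take i).count pvZ) < i) ∧
    (((PySem.Str.split? s " ").getD []).getD i pvZ ≠ pvZ →
      (PySem.Int.ofStr? (((PySem.Str.split? s " ").getD []).getD i pvZ)).isSome = true)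
instance (s : String) : Decidable (Pre_solution s) := by unfold Pre_solution; infer_instance

def pvWitness_solution : String := "1 2 Z 3"

def Spec_solution (s : String) (out : Int) : Prop := out = solution_alt s
instance (s : String) (out : Int) : Decidable (Spec_solution s out) := by unfold Spec_solution; infer_instance

-- ===== CLAIM (what is proved, stated in full; the proofs are below) =====
def Claim_equal_solution : Prop := ∀ (s : String), Dom_solution s → Pre_solution s → Spec_solution s (solution s)

-- ===== LEMMAS AND PROOFS =====

-- A's loop composes over list append.
theorem loopA_append (l₁ l₂ : List String) : ∀ st,
    solutionLoopA (l₁ ++ l₂) st = (solutionLoopA l₁ st).bind (solutionLoopA l₂) := by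
  induction l₁ with
  | nil => intro st; simp [solutionLoopA]
  | cons t rest ih =>
    intro st
    by_cases hz : t = "Z"
    · subst hz
      simp only [List.cons_append, solutionLoopA, ne_eq, not_true_eq_false, if_false]
      cases PySem.List.pop? st (-1) with
      | none => simp
      | some r => exact ih r.2
    · simp only [List.cons_append, solutionLoopA, if_pos hz, ne_eq]
      cases PySem.Int.ofStr? t with
      | none => simp
      | some n => exact ih (st ++ [n])

-- Pre_'s counting condition (relativised to an initial stack of size m) makes A's loop succeed.
theorem loopA_succeeds (toks : List String) : ∀ (st : List Int),
    (∀ i ∈ List.range toks.length,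
      (toks.getD i pvZ = pvZ → 2 * ((toks.take i).count pvZ) < i + st.length) ∧
      (toks.getD i pvZ ≠ pvZ → (PySem.Int.ofStr? (toks.getD i pvZ)).isSome = true)) →
    (solutionLoopA toks st).isSome = true := by
  induction toks with
  | nil => intro st _; simp [solutionLoopA]
  | cons t rest ih =>
    intro st h
    have h0 := h 0 (by simp)
    by_cases hz : t = "Z"
    · subst hz
      have hst : st ≠ [] := by
        have := (h0.1 (by simp [pvZ]))
        simp at this
        intro hnil; rw [hnil] at this; simp at this
      have hdec : st = st.dropLast ++ [st.getLast hst] := by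
        simp [List.dropLast_append_getLast]
      have hpop : PySem.List.pop? st (-1) = some (st.getLast hst, st.dropLast) := by
        conv_lhs => rw [hdec]
        exact PySem.List.pop?_last _ _
      simp only [solutionLoopA, ne_eq, not_true_eq_false, if_false, hpop]
      apply ih
      intro i hi
      simp only [List.mem_range] at hi
      have hnext := h (i + 1) (by simp; omega)
      have hlen : st.dropLast.length = st.length - 1 := by simp
      have hslen : 1 ≤ st.length := by
        cases st with | nil => exact absurd rfl hst | cons a l => simp
      constructor
      · intro hzi
        have := hnext.1 (by simpa using hzi)
        have hcnt : (("Z" :: rest).take (i + 1)).count pvZ = (rest.take i).count pvZ + 1 := by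
          simp [List.take_succ_cons, pvZ]
        rw [hcnt] at this
        omega
      · intro hzi
        have := hnext.2 (by simpa using hzi)
        simpa using this
    · have hp : (PySem.Int.ofStr? t).isSome = true := h0.2 (by simpa [pvZ] using hz)
      obtain ⟨n, hn⟩ := Option.isSome_iff_exists.mp hp
      simp only [solutionLoopA, if_pos hz, ne_eq, hn]
      apply ih
      intro i hi
      simp only [List.mem_range] at hi
      have hnext := h (i + 1) (by simp; omega)
      constructor
      · intro hzi
        have := hnext.1 (by simpa using hzi)
        have hcnt : ((t :: rest).take (i + 1)).count pvZ = (rest.take i).count pvZ := by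
          simp [List.take_succ_cons, pvZ, hz]
        rw [hcnt] at this
        simp at this ⊢
        omega
      · intro hzi
        have := hnext.2 (by simpa using hzi)
        simpa using this

-- Main invariant: when A's loop (from the empty stack) produces the stack `res`, B's
-- backward scan with `k` pending undos cancels the top `k` elements of `res` and adds
-- the sum of the remainder to its total.
theorem loopB_of_loopA (toks : List String) : ∀ (res : List Int),
    solutionLoopA toks [] = some res → ∀ (k : Nat) (t : Int),
    solutionLoopB toks.reverse k t =
      some (k - min k res.length, t + ((res.take (res.length - k)).map id).sum) := by
  induction toks using List.reverseRecOn with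
  | nil =>
    intro res h k t
    simp [solutionLoopA] at h
    subst h
    simp [solutionLoopB]
  | append_singleton l tok ih =>
    intro res h k t
    rw [loopA_append] at h
    cases h0 : solutionLoopA l [] with
    | none => rw [h0] at h; simp at h
    | some st₀ =>
      rw [h0] at h; simp only [Option.bind_some] at h
      rw [List.reverse_append, List.reverse_singleton, List.singleton_append]
      by_cases hz : tok = "Z"
      · subst hz
        simp only [solutionLoopA, ne_eq, not_true_eq_false, if_false] at h
        cases hpop : PySem.List.pop? st₀ (-1) with
        | none => rw [hpop] at h; simp at h
        | some r =>
          rw [hpop] at h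
          simp only [Option.some_inj] at h
          have hne : st₀ ≠ [] := by
            rintro rfl; simp [PySem.List.pop?] at hpop
          have hdec : st₀ = st₀.dropLast ++ [st₀.getLast hne] := by
            simp [List.dropLast_append_getLast]
          have hpop' : PySem.List.pop? st₀ (-1) = some (st₀.getLast hne, st₀.dropLast) := by
            conv_lhs => rw [hdec]
            exact PySem.List.pop?_last _ _
          rw [hpop] at hpop'
          have hres : res = st₀.dropLast := by
            rw [← h]; exact congrArg Prod.snd (Option.some_inj.mp hpop'.symm).symm
          simp only [solutionLoopB]
          rw [ih st₀ h0 (k + 1) t, hres]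
          have hlen : st₀.dropLast.length = st₀.length - 1 := by simp
          have hslen : 1 ≤ st₀.length := by
            cases st₀ with | nil => exact absurd rfl hne | cons a l => simp
          have htk : st₀.take (st₀.length - (k + 1)) = st₀.dropLast.take (st₀.length - 1 - k) := by
            rw [List.dropLast_eq_take, List.take_take]
            congr 1
            omega
          rw [htk, hlen]
          have hmin : k + 1 - min (k + 1) st₀.length = k - min k (st₀.length - 1) := by omega
          rw [hmin]
          simp
      · simp only [solutionLoopA, if_pos hz, ne_eq] at h
        cases hp : PySem.Int.ofStr? tok with
        | none => rw [hp] at h; simp at h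
        | some n =>
          rw [hp] at h
          simp only [Option.some_inj] at h
          simp only [solutionLoopB, if_neg hz, hp]
          by_cases hk : k = 0
          · subst hk
            simp only [ne_eq, not_true_eq_false, if_false]
            rw [ih st₀ h0 0 (t + n), ← h]
            simp [List.map_id]
            ring
          · simp only [ne_eq, hk, not_false_eq_true, if_true]
            rw [ih st₀ h0 (k - 1) t, ← h]
            have hlen : (st₀ ++ [n]).length = st₀.length + 1 := by simp
            have htk : (st₀ ++ [n]).take (st₀.length + 1 - k) = st₀.take (st₀.length - (k - 1)) := by
              rw [List.take_append_of_le_length (by omega)]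
              congr 1
              omega
            rw [hlen, htk]
            have hk1 : 1 ≤ k := Nat.one_le_iff_ne_zero.mpr hk
            have hmin : k - min k (st₀.length + 1) = k - 1 - min (k - 1) st₀.length := by omega
            rw [hmin]

theorem foldl_eq_sum (l : List Int) : ∀ (a : Int), l.foldl (· + ·) a = a + (l.map id).sum := by
  induction l with
  | nil => intro a; simp
  | cons x l ih =>
    intro a
    rw [List.foldl_cons, ih (a + x)]
    simp [add_assoc]

-- ===== VERDICT (by name: the statement is the Claim_ definition above) =====
theorem solution_spec : Claim_equal_solution := by
  intro s _ hpre
  unfold Spec_solution solution solution_alt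
  set toks := (PySem.Str.split? s " ").getD [] with htoks
  have hsucc : (solutionLoopA toks []).isSome = true := by
    apply loopA_succeeds
    intro i hi
    have := hpre i hi
    simpa using this
  obtain ⟨res, hres⟩ := Option.isSome_iff_exists.mp hsucc
  rw [hres, loopB_of_loopA toks res hres 0 0]
  simp [foldl_eq_sum res 0]
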